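-- pv_equiv track=rewrite | github.com/maxlin0116/NTUEE-carcar-course | main_path_algorithm/main_path.py | build_search_path
-- ===== SOURCE A (Python) =====
-- import collections
--
-- def shortest_path(adjacency, start_node, goal_node):
--     if start_node not in adjacency or goal_node not in adjacency:
--         return []
--
--     queue = collections.deque([start_node])
--     parent = {start_node: None}
--
--     while queue:
--         current = queue.popleft()
--         if current == goal_node:
--             path = []
--             while current is not None:
--                 path.append(current)
--                 current = parent[current]
--             return list(reversed(path))
--
--         for neighbor in adjacency.get(current, []):
--             if neighbor in parent:
--                 continue
--             parent[neighbor] = current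
--             queue.append(neighbor)
--
--     return []
--
-- def build_search_path(adjacency, start_node, targets):
--     if not targets:
--         return [start_node]
--
--     full_path = [start_node]
--     current = start_node
--     for target in targets:
--         segment = shortest_path(adjacency, current, target)
--         if not segment:
--             raise ValueError(f"No path from node {current} to node {target}.")
--         full_path.extend(segment[1:])
--         current = target
--
--     return full_path
-- ===== SOURCE B (Python) =====
-- def _level_bfs(adjacency, start_node, goal_node):
--     if start_node in adjacency and goal_node in adjacency:
--         seen = {start_node}
--         frontier = [[start_node]]
--         while frontier:
--             for path in frontier:
--                 if path[-1] == goal_node: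
--                     return path
--             nxt = []
--             for path in frontier:
--                 for neighbor in adjacency.get(path[-1], []):
--                     if neighbor not in seen:
--                         seen.add(neighbor)
--                         nxt.append(path + [neighbor])
--             frontier = nxt
--     return []
--
-- def build_search_path(adjacency, start_node, targets):
--     result = [start_node]
--     for a, b in zip([start_node] + targets, targets):
--         segment = _level_bfs(adjacency, a, b)
--         if not segment:
--             raise ValueError(f"No path from node {a} to node {b}.")
--         result.extend(segment[1:])
--     return result
-- ===== Notes on version B (the rewrite author's own statement) =====
-- stated objective: alternative
-- what changed: The BFS is restructured as a level-synchronous search carrying whole paths: each round first scans the frontier for the goal and then builds the next frontier of extended paths guarded by a seen set, replacing the deque + parent-pointer dictionary + backward reconstruction loop; the chaining loop runs over zip pairs of consecutive waypoints instead of a mutated 'current' variable.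
import Mathlib
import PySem

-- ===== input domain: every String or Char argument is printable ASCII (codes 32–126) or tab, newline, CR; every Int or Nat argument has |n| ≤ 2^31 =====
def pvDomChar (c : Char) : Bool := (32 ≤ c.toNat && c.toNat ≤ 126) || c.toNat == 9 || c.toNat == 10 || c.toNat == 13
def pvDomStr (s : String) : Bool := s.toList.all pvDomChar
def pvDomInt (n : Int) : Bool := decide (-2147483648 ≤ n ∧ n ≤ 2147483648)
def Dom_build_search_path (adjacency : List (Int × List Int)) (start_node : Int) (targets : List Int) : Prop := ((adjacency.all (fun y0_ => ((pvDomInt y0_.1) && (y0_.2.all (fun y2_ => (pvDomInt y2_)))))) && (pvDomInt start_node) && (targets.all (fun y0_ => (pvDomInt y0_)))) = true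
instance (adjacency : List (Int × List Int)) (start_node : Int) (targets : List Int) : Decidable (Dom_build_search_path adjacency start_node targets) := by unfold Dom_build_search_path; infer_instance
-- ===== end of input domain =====

-- B replaces the deque + parent-dictionary + backward-reconstruction BFS by a level-synchronous
-- BFS that carries whole paths (scan the frontier for the goal, then build the next frontier of
-- extended paths guarded by a seen set), and chains the legs over zip pairs of consecutive
-- waypoints; objective: alternative (same behaviour, different data structures).
-- Python A raises ValueError when some leg is unreachable; Pre_ excludes exactly those inputs.
-- Fuel note: in both ports each discovered node other than the start comes from some neighbour
-- list and is discovered at most once (guarded by parent/seen), so 1 + Σ|neighbour lists| bounds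
-- A's dequeues and B's frontier rounds: that number is used as fuel (a totality guard only).

-- ===== PORT A =====
-- 'while current is not None: path.append(current); current = parent[current]'; on reachable states
-- 'current' is always a key of parent, so parent[current] is ported exactly as (get? …).getD none.
def reconstructA (parent : PySem.Dict Int (Option Int)) : Nat → Option Int → List Int → List Int
  | 0, _, acc => acc
  | _ + 1, none, acc => acc
  | f + 1, some c, acc => reconstructA parent f ((parent.get? c).getD none) (acc ++ [c])

def bfsA (d : PySem.Dict Int (List Int)) (goal : Int) : Nat → List Int → PySem.Dict Int (Option Int) → List Int
  | 0, _, _ => []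
  | _ + 1, [], _ => []
  | f + 1, current :: queue, parent =>
    if current = goal then
      (reconstructA parent parent.items.length (some current) []).reverse
    else
      let st := (d.getD current []).foldl
        (fun (st : List Int × PySem.Dict Int (Option Int)) n =>
          if st.2.contains n then st else (st.1 ++ [n], st.2.insert n (some current)))
        (queue, parent)
      bfsA d goal f st.1 st.2

def shortest_pathA (adjacency : List (Int × List Int)) (start_node goal_node : Int) : List Int :=
  let d := PySem.Dict.ofList adjacency
  if !(d.contains start_node) || !(d.contains goal_node) then []
  else
    bfsA d goal_node ((adjacency.map (fun p => p.2.length)).sum + 1) [start_node]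
      (PySem.Dict.empty.insert start_node none)

-- the 'for target in targets' loop; 'none' is Python's ValueError (excluded by Pre_)
def buildLoopA (adjacency : List (Int × List Int)) : List Int → List Int → Int → Option (List Int)
  | [], full_path, _ => some full_path
  | target :: ts, full_path, current =>
    let segment := shortest_pathA adjacency current target
    if segment.isEmpty then none
    else buildLoopA adjacency ts (full_path ++ PySem.List.slice segment (some 1) none) target

def build_search_path (adjacency : List (Int × List Int)) (start_node : Int) (targets : List Int) : List Int :=
  if targets.isEmpty then [start_node]
  else (buildLoopA adjacency targets [start_node] start_node).getD []

-- ===== PORT B =====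
-- level-synchronous BFS: 'for path in frontier: if path[-1]==goal: return path' is find?, then the
-- nested 'for path in frontier / for neighbor in adjacency.get(path[-1], [])' loops build (nxt, seen)
def bfsB (d : PySem.Dict Int (List Int)) (goal : Int) : Nat → List (List Int) → PySem.Set Int → List Int
  | 0, _, _ => []
  | f + 1, frontier, seen =>
    if frontier.isEmpty then []
    else
      match frontier.find? (fun p => PySem.List.pyGetD p (-1) 0 == goal) with
      | some p => p
      | none =>
        let st := frontier.foldl
          (fun (st : List (List Int) × PySem.Set Int) path =>
            (d.getD (PySem.List.pyGetD path (-1) 0) []).foldl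
              (fun st n =>
                if PySem.Set.contains st.2 n then st
                else (st.1 ++ [path ++ [n]], PySem.Set.add st.2 n)) st)
          ([], seen)
        bfsB d goal f st.1 st.2

def level_bfsB (adjacency : List (Int × List Int)) (start_node goal_node : Int) : List Int :=
  let d := PySem.Dict.ofList adjacency
  if d.contains start_node && d.contains goal_node then
    bfsB d goal_node ((adjacency.map (fun p => p.2.length)).sum + 1) [[start_node]]
      (PySem.Set.add PySem.Set.empty start_node)
  else []

-- 'for a, b in zip([start_node] + targets, targets)'; 'none' is Python's ValueError
def buildLoopB (adjacency : List (Int × List Int)) : List (Int × Int) → List Int → Option (List Int)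
  | [], result => some result
  | leg :: legs, result =>
    let segment := level_bfsB adjacency leg.1 leg.2
    if segment.isEmpty then none
    else buildLoopB adjacency legs (result ++ PySem.List.slice segment (some 1) none)

def build_search_path_alt (adjacency : List (Int × List Int)) (start_node : Int) (targets : List Int) : List Int :=
  (buildLoopB adjacency ((start_node :: targets).zip targets) [start_node]).getD []

-- ===== PRECONDITION & SPEC =====
-- one expansion step of the reachable set, and its iteration (plain transitive-closure saturation)
def pvExpand (d : PySem.Dict Int (List Int)) (S : PySem.Set Int) : PySem.Set Int :=
  S.foldl (fun acc k => PySem.Set.update acc (d.getD k [])) S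

def pvReach (d : PySem.Dict Int (List Int)) (a : Int) : Nat → PySem.Set Int
  | 0 => PySem.Set.add PySem.Set.empty a
  | n + 1 => pvExpand d (pvReach d a n)

-- Pre_ excludes exactly the inputs on which Python A raises ValueError: some leg (c, t) of the chain
-- start :: targets has c or t outside the adjacency keys, or t unreachable from c along neighbour edges.
def Pre_build_search_path (adjacency : List (Int × List Int)) (start_node : Int) (targets : List Int) : Prop :=
  (((start_node :: targets).zip targets).all (fun pr =>
    (PySem.Dict.ofList adjacency).contains pr.1 &&
    (PySem.Dict.ofList adjacency).contains pr.2 &&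
    decide (pr.2 ∈ pvReach (PySem.Dict.ofList adjacency) pr.1 adjacency.length))) = true
instance (adjacency : List (Int × List Int)) (start_node : Int) (targets : List Int) : Decidable (Pre_build_search_path adjacency start_node targets) := by unfold Pre_build_search_path; infer_instance

def pvWitness_build_search_path : (List (Int × List Int)) × Int × List Int :=
  ([(1, [2, 3]), (2, [1]), (3, [])], 1, [2, 3])

def Spec_build_search_path (adjacency : List (Int × List Int)) (start_node : Int) (targets : List Int) (out : List Int) : Prop := out = build_search_path_alt adjacency start_node targets
instance (adjacency : List (Int × List Int)) (start_node : Int) (targets : List Int) (out : List Int) : Decidable (Spec_build_search_path adjacency start_node targets out) := by unfold Spec_build_search_path; infer_instance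

-- ===== CLAIM (what is proved, stated in full; the proofs are below) =====
def Claim_equal_build_search_path : Prop := ∀ (adjacency : List (Int × List Int)) (start_node : Int) (targets : List Int), Dom_build_search_path adjacency start_node targets → Pre_build_search_path adjacency start_node targets → Spec_build_search_path adjacency start_node targets (build_search_path adjacency start_node targets)

-- ===== LEMMAS AND PROOFS =====

-- p.reverse is a parent chain: each entry points to the next, the last one to none
def ChainR (parent : PySem.Dict Int (Option Int)) : List Int → Prop
  | [] => True
  | [x] => parent.get? x = some none
  | x :: y :: r => parent.get? x = some (some y) ∧ ChainR parent (y :: r)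

def DictLe (p q : PySem.Dict Int (Option Int)) : Prop :=
  ∀ k v, p.get? k = some v → q.get? k = some v

def GoodP (parent : PySem.Dict Int (Option Int)) (p : List Int) : Prop :=
  p ≠ [] ∧ ChainR parent p.reverse ∧ p.length ≤ parent.items.length

def lastD (p : List Int) : Int := p.getLast?.getD 0

theorem chainR_mono (p q : PySem.Dict Int (Option Int)) (h : DictLe p q) :
    ∀ r, ChainR p r → ChainR q r := by
  intro r
  induction r with
  | nil => intro _; trivial
  | cons x s ih =>
    cases s with
    | nil => intro hc; exact h _ _ hc
    | cons y t => intro hc; exact ⟨h _ _ hc.1, ih hc.2⟩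

theorem reconstructA_chain (parent : PySem.Dict Int (Option Int)) :
    ∀ (r : List Int) (x : Int) (f : Nat) (acc : List Int), ChainR parent (x :: r) →
      (x :: r).length ≤ f → reconstructA parent f (some x) acc = acc ++ x :: r := by
  intro r
  induction r with
  | nil =>
    intro x f acc hc hf
    match f, hf with
    | g + 1, _ =>
      have hx : parent.get? x = some none := hc
      simp [reconstructA, hx]
      cases g <;> simp [reconstructA]
  | cons y s ih =>
    intro x f acc hc hf
    match f, hf with
    | g + 1, hf =>
      have hx : parent.get? x = some (some y) := hc.1
      simp only [reconstructA, hx, Option.getD_some]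
      have := ih y g (acc ++ [x]) hc.2 (by simpa using Nat.lt_succ_iff.mp (by simpa using hf))
      simpa using this

theorem set_contains_add (s k : Int) (v : PySem.Set Int) :
    PySem.Set.contains (PySem.Set.add v s) k = (PySem.Set.contains v k || (k == s)) := by
  by_cases h : k ∈ PySem.Set.add v s
  · rw [(PySem.Set.contains_iff _ _).mpr h]
    rcases (PySem.Set.mem_add _ _ _).mp h with h1 | h2
    · simp; tauto
    · simp; tauto
  · have h1 : ¬ k ∈ v := fun hm => h ((PySem.Set.mem_add _ _ _).mpr (Or.inl hm))
    have h2 : ¬ (k = s) := fun he => h ((PySem.Set.mem_add _ _ _).mpr (Or.inr he))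
    have c1 : PySem.Set.contains (PySem.Set.add v s) k = false := by
      cases hc : PySem.Set.contains (PySem.Set.add v s) k
      · rfl
      · exact absurd ((PySem.Set.contains_iff _ _).mp hc) h
    have c2 : PySem.Set.contains v k = false := by
      cases hc : PySem.Set.contains v k
      · rfl
      · exact absurd ((PySem.Set.contains_iff _ _).mp hc) h1
    simp [h2]

theorem dictLe_insert_fresh (d : PySem.Dict Int (Option Int)) (n : Int) (v : Option Int)
    (h : d.contains n = false) : DictLe d (d.insert n v) := by
  intro k w hk
  have hne : k ≠ n := by
    intro he; subst he
    rw [PySem.Dict.contains_eq_isSome_get?, hk] at h; simp at h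
  rw [PySem.Dict.get?_insert_of_ne d v hne]; exact hk

theorem dictLe_trans (p q r : PySem.Dict Int (Option Int)) (h1 : DictLe p q) (h2 : DictLe q r) :
    DictLe p r := fun _ _ hk => h2 _ _ (h1 _ _ hk)

theorem items_insert_fresh_length (d : PySem.Dict Int (Option Int)) (n : Int) (v : Option Int)
    (h : d.contains n = false) : (d.insert n v).items.length = d.items.length + 1 := by
  rw [PySem.Dict.items_insert_of_not_contains d v h]; simp

theorem pyGetD_lastD (p : List Int) (hne : p ≠ []) : PySem.List.pyGetD p (-1) 0 = lastD p := by
  rw [PySem.List.pyGetD_neg_one p 0 hne]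
  simp [lastD, List.getLast?_eq_some_getLast hne]

theorem reverse_lastD (p : List Int) (hne : p ≠ []) : ∃ rest, p.reverse = lastD p :: rest := by
  have hl : p.getLast? = some (p.getLast hne) := List.getLast?_eq_some_getLast hne
  cases hpr : p.reverse with
  | nil => exact absurd (by simpa using hpr) hne
  | cons c r =>
    refine ⟨r, ?_⟩
    have hh : p.reverse.head? = some (lastD p) := by
      rw [List.head?_reverse]; simp [lastD, hl]
    rw [hpr] at hh
    simp at hh
    rw [hh]

theorem nodup_subset_length (l1 l2 : List Int) (h1 : l1.Nodup) (h2 : ∀ x ∈ l1, x ∈ l2) :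
    l1.length ≤ l2.length := by
  calc l1.length = l1.toFinset.card := (List.toFinset_card_of_nodup h1).symm
  _ ≤ l2.toFinset.card := Finset.card_le_card (by intro x hx; simp at hx ⊢; exact h2 x hx)
  _ ≤ l2.length := l2.toFinset_card_le

-- the joint state of the two neighbour loops (A's queue carries the untouched prefix 'pre')
def RelSt (root : Int) (flat : List Int) (current : Int) (rest path pre : List Int)
    (stA : List Int × PySem.Dict Int (Option Int))
    (stB : List (List Int) × PySem.Set Int) : Prop :=
  stA.1 = pre ++ stB.1.map lastD ∧
  (∀ n : Int, stA.2.contains n = PySem.Set.contains stB.2 n) ∧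
  (∀ p ∈ stB.1, GoodP stA.2 p) ∧
  ChainR stA.2 (current :: rest) ∧
  path.length ≤ stA.2.items.length ∧
  stA.2.keys.Nodup ∧
  stB.2.Nodup ∧
  (∀ x ∈ stB.2, x ∈ root :: flat)

theorem foldl_step (root : Int) (flat : List Int) (path : List Int) (current : Int) (rest : List Int)
    (hrev : path.reverse = current :: rest) :
    ∀ (l : List Int), (∀ n ∈ l, n ∈ flat) →
    ∀ (qA : List Int) (parent : PySem.Dict Int (Option Int))
      (qB : List (List Int)) (vis : PySem.Set Int) (pre : List Int),
      RelSt root flat current rest path pre (qA, parent) (qB, vis) →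
      RelSt root flat current rest path pre
        (l.foldl (fun (st : List Int × PySem.Dict Int (Option Int)) n =>
            if st.2.contains n then st else (st.1 ++ [n], st.2.insert n (some current)))
          (qA, parent))
        (l.foldl (fun (st : List (List Int) × PySem.Set Int) n =>
            if PySem.Set.contains st.2 n then st
            else (st.1 ++ [path ++ [n]], PySem.Set.add st.2 n))
          (qB, vis))
      ∧ DictLe parent
          (l.foldl (fun (st : List Int × PySem.Dict Int (Option Int)) n =>
            if st.2.contains n then st else (st.1 ++ [n], st.2.insert n (some current)))
          (qA, parent)).2
      ∧ parent.items.length ≤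
          (l.foldl (fun (st : List Int × PySem.Dict Int (Option Int)) n =>
            if st.2.contains n then st else (st.1 ++ [n], st.2.insert n (some current)))
          (qA, parent)).2.items.length := by
  intro l
  induction l with
  | nil =>
    intro hl qA parent qB vis pre h
    exact ⟨h, fun _ _ hk => hk, le_refl _⟩
  | cons n l ih =>
    intro hl qA parent qB vis pre h
    obtain ⟨hmap, hinv, hgood, hchain, hlen, hnodK, hnodS, hsub⟩ := h
    dsimp only at hmap hinv hgood hchain hlen hnodK hnodS hsub
    simp only [List.foldl_cons]
    by_cases hb : parent.contains n = true
    · have hv : PySem.Set.contains vis n = true := by rw [← hinv]; exact hb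
      simp only [hb, hv, if_pos]
      exact ih (fun m hm => hl m (List.mem_cons_of_mem _ hm)) qA parent qB vis pre
        ⟨hmap, hinv, hgood, hchain, hlen, hnodK, hnodS, hsub⟩
    · have hbf : parent.contains n = false := by
        cases hc : parent.contains n
        · rfl
        · exact absurd hc hb
      have hv : PySem.Set.contains vis n = false := by rw [← hinv]; exact hbf
      simp only [hbf, hv, if_neg, Bool.false_eq_true, not_false_iff]
      have hle : DictLe parent (parent.insert n (some current)) :=
        dictLe_insert_fresh parent n (some current) hbf
      have hlen' : (parent.insert n (some current)).items.length = parent.items.length + 1 :=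
        items_insert_fresh_length parent n (some current) hbf
      have hnmem : n ∉ vis := by
        intro hm
        rw [(PySem.Set.contains_iff _ _).mpr hm] at hv; exact absurd hv (by simp)
      have hrel : RelSt root flat current rest path pre
          (qA ++ [n], parent.insert n (some current))
          (qB ++ [path ++ [n]], PySem.Set.add vis n) := by
        refine ⟨?_, ?_, ?_, ?_, ?_, ?_, ?_, ?_⟩
        · simp only [hmap, List.map_append, List.map_cons, List.map_nil]
          simp [lastD]
        · intro k
          rw [PySem.Dict.contains_insert, set_contains_add, hinv k, Bool.or_comm]
        · intro p hp
          rcases List.mem_append.mp hp with hp1 | hp2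
          · obtain ⟨hne, hch, hl2⟩ := hgood p hp1
            exact ⟨hne, chainR_mono _ _ hle _ hch, by dsimp only; omega⟩
          · have hp2 : p = path ++ [n] := by simpa using hp2
            subst hp2
            refine ⟨by simp, ?_, by dsimp only; simp; omega⟩
            show ChainR _ (path ++ [n]).reverse
            rw [List.reverse_append, List.reverse_singleton, List.singleton_append, hrev]
            exact ⟨PySem.Dict.get?_insert_self _ _ _, chainR_mono _ _ hle _ hchain⟩
        · exact chainR_mono _ _ hle _ hchain
        · dsimp only; omega
        · exact PySem.Dict.nodup_keys_insert _ _ _ hnodK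
        · exact PySem.Set.nodup_add vis n hnodS
        · intro x hx
          rcases (PySem.Set.mem_add _ _ _).mp hx with hx1 | hx2
          · exact hsub x hx1
          · exact hx2 ▸ List.mem_cons_of_mem _ (hl n List.mem_cons_self)
      obtain ⟨h1, h2, h3⟩ := ih (fun m hm => hl m (List.mem_cons_of_mem _ hm))
        (qA ++ [n]) (parent.insert n (some current)) (qB ++ [path ++ [n]])
        (PySem.Set.add vis n) pre hrel
      exact ⟨h1, dictLe_trans _ _ _ hle h2, by omega⟩

-- the B-side expansion grows the next frontier and the seen set in lockstep
theorem foldB_sizes (path : List Int) :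
    ∀ (l : List Int) (st : List (List Int) × PySem.Set Int),
      (l.foldl (fun (st : List (List Int) × PySem.Set Int) n =>
          if PySem.Set.contains st.2 n then st
          else (st.1 ++ [path ++ [n]], PySem.Set.add st.2 n)) st).1.length + st.2.length =
      (l.foldl (fun (st : List (List Int) × PySem.Set Int) n =>
          if PySem.Set.contains st.2 n then st
          else (st.1 ++ [path ++ [n]], PySem.Set.add st.2 n)) st).2.length + st.1.length := by
  intro l
  induction l with
  | nil => intro st; simp only [List.foldl_nil]; omega
  | cons n l ih =>
    intro st
    simp only [List.foldl_cons]
    by_cases hb : PySem.Set.contains st.2 n = true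
    · simp only [hb, if_pos]; exact ih st
    · simp only [hb, if_neg, Bool.false_eq_true, not_false_iff]
      have hnmem : n ∉ st.2 := by
        intro hm; rw [(PySem.Set.contains_iff _ _).mpr hm] at hb; exact absurd rfl hb
      have := ih (st.1 ++ [path ++ [n]], PySem.Set.add st.2 n)
      rw [PySem.Set.add_of_not_mem hnmem] at this ⊢
      simp at this ⊢
      omega

theorem levelB_sizes (d : PySem.Dict Int (List Int)) :
    ∀ (F : List (List Int)) (st : List (List Int) × PySem.Set Int),
      (F.foldl (fun (st : List (List Int) × PySem.Set Int) path =>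
          (d.getD (PySem.List.pyGetD path (-1) 0) []).foldl
            (fun st n =>
              if PySem.Set.contains st.2 n then st
              else (st.1 ++ [path ++ [n]], PySem.Set.add st.2 n)) st) st).1.length + st.2.length =
      (F.foldl (fun (st : List (List Int) × PySem.Set Int) path =>
          (d.getD (PySem.List.pyGetD path (-1) 0) []).foldl
            (fun st n =>
              if PySem.Set.contains st.2 n then st
              else (st.1 ++ [path ++ [n]], PySem.Set.add st.2 n)) st) st).2.length + st.1.length := by
  intro F
  induction F with
  | nil => intro st; simp only [List.foldl_nil]; omega
  | cons p F ih =>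
    intro st
    simp only [List.foldl_cons]
    have h1 := foldB_sizes p (d.getD (PySem.List.pyGetD p (-1) 0) []) st
    have h2 := ih ((d.getD (PySem.List.pyGetD p (-1) 0) []).foldl
      (fun st n =>
        if PySem.Set.contains st.2 n then st
        else (st.1 ++ [p ++ [n]], PySem.Set.add st.2 n)) st)
    omega

-- A processes one whole BFS level: either some frontier path already ends at the goal (A returns
-- exactly that carried path), or A reaches the next level with a parent dict matching B's fold
theorem level_process (d : PySem.Dict Int (List Int)) (g root : Int) (flat : List Int)
    (hvals : ∀ k n, n ∈ d.getD k [] → n ∈ flat) :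
    ∀ (F : List (List Int)) (fA : Nat) (acc : List (List Int))
      (parent : PySem.Dict Int (Option Int)) (vis : PySem.Set Int),
      F.length ≤ fA →
      (∀ n, parent.contains n = PySem.Set.contains vis n) →
      (∀ p ∈ F ++ acc, GoodP parent p) →
      parent.keys.Nodup → vis.Nodup → (∀ x ∈ vis, x ∈ root :: flat) →
      (match F.find? (fun p => PySem.List.pyGetD p (-1) 0 == g) with
       | some p => bfsA d g fA (F.map lastD ++ acc.map lastD) parent = p
       | none =>
         ∃ parent',
           bfsA d g fA (F.map lastD ++ acc.map lastD) parent
             = bfsA d g (fA - F.length)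
                 ((F.foldl (fun (st : List (List Int) × PySem.Set Int) path =>
                     (d.getD (PySem.List.pyGetD path (-1) 0) []).foldl
                       (fun st n =>
                         if PySem.Set.contains st.2 n then st
                         else (st.1 ++ [path ++ [n]], PySem.Set.add st.2 n)) st)
                   (acc, vis)).1.map lastD) parent'
           ∧ (∀ n, parent'.contains n = PySem.Set.contains
               (F.foldl (fun (st : List (List Int) × PySem.Set Int) path =>
                   (d.getD (PySem.List.pyGetD path (-1) 0) []).foldl
                     (fun st n =>
                       if PySem.Set.contains st.2 n then st
                       else (st.1 ++ [path ++ [n]], PySem.Set.add st.2 n)) st)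
                 (acc, vis)).2 n)
           ∧ (∀ p ∈ (F.foldl (fun (st : List (List Int) × PySem.Set Int) path =>
                   (d.getD (PySem.List.pyGetD path (-1) 0) []).foldl
                     (fun st n =>
                       if PySem.Set.contains st.2 n then st
                       else (st.1 ++ [path ++ [n]], PySem.Set.add st.2 n)) st)
                 (acc, vis)).1, GoodP parent' p)
           ∧ parent'.keys.Nodup
           ∧ (F.foldl (fun (st : List (List Int) × PySem.Set Int) path =>
                 (d.getD (PySem.List.pyGetD path (-1) 0) []).foldl
                   (fun st n =>
                     if PySem.Set.contains st.2 n then st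
                     else (st.1 ++ [path ++ [n]], PySem.Set.add st.2 n)) st)
               (acc, vis)).2.Nodup
           ∧ (∀ x ∈ (F.foldl (fun (st : List (List Int) × PySem.Set Int) path =>
                 (d.getD (PySem.List.pyGetD path (-1) 0) []).foldl
                   (fun st n =>
                     if PySem.Set.contains st.2 n then st
                     else (st.1 ++ [path ++ [n]], PySem.Set.add st.2 n)) st)
               (acc, vis)).2, x ∈ root :: flat)) := by
  intro F
  induction F with
  | nil =>
    intro fA acc parent vis _ hinv hgood hnodK hnodS hsub
    simp only [List.find?_nil, List.foldl_nil, List.map_nil, List.nil_append]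
    exact ⟨parent, rfl, hinv, fun p hp => hgood p (by simpa using hp), hnodK, hnodS, hsub⟩
  | cons p F ih =>
    intro fA acc parent vis hfa hinv hgood hnodK hnodS hsub
    match fA, hfa with
    | fA + 1, hfa =>
      obtain ⟨hne, hchain, hlen⟩ := hgood p (List.mem_cons_self)
      obtain ⟨rest, hrev⟩ := reverse_lastD p hne
      have hchain' : ChainR parent (lastD p :: rest) := by rw [← hrev]; exact hchain
      have hqueue : (p :: F).map lastD ++ acc.map lastD
          = lastD p :: (F.map lastD ++ acc.map lastD) := by simp
      by_cases hg : lastD p = g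
      · have hfind : (p :: F).find? (fun p => PySem.List.pyGetD p (-1) 0 == g) = some p := by
          apply List.find?_cons_of_pos
          simp [pyGetD_lastD p hne, hg]
        rw [hfind]
        rw [hqueue]
        simp only [bfsA, hg, if_pos]
        have hlenr : (g :: rest).length ≤ parent.items.length := by
          have h1 : (lastD p :: rest).length = p.length := by
            rw [← hrev, List.length_reverse]
          rw [← hg]; omega
        have hchg : ChainR parent (g :: rest) := hg ▸ hchain'
        rw [reconstructA_chain parent rest g parent.items.length [] hchg hlenr]
        rw [List.nil_append, ← hg, ← hrev, List.reverse_reverse]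
      · have hfind : (p :: F).find? (fun p => PySem.List.pyGetD p (-1) 0 == g)
            = F.find? (fun p => PySem.List.pyGetD p (-1) 0 == g) := by
          apply List.find?_cons_of_neg
          simp [pyGetD_lastD p hne, hg]
        rw [hfind]
        rw [hqueue]
        simp only [bfsA, hg, if_neg, not_false_iff]
        -- one neighbour fold, related on both sides
        obtain ⟨hrel, hdle, hsize⟩ := foldl_step root flat p (lastD p) rest hrev
          (d.getD (lastD p) []) (fun n hn => hvals _ n hn)
          (F.map lastD ++ acc.map lastD) parent acc vis (F.map lastD)
          ⟨rfl, hinv, fun q hq => hgood q (List.mem_cons_of_mem _ (List.mem_append_right _ hq)),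
            hchain', hlen, hnodK, hnodS, hsub⟩
        obtain ⟨hmap, hinv', hgood', _, _, hnodK', hnodS', hsub'⟩ := hrel
        rw [hmap]
        have hstepeq : ((d.getD (PySem.List.pyGetD p (-1) 0) []).foldl
            (fun (st : List (List Int) × PySem.Set Int) n =>
              if PySem.Set.contains st.2 n then st
              else (st.1 ++ [p ++ [n]], PySem.Set.add st.2 n)) (acc, vis))
            = ((d.getD (lastD p) []).foldl
            (fun (st : List (List Int) × PySem.Set Int) n =>
              if PySem.Set.contains st.2 n then st
              else (st.1 ++ [p ++ [n]], PySem.Set.add st.2 n)) (acc, vis)) := by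
          rw [pyGetD_lastD p hne]
        -- goodness of the untouched remaining level under the grown parent
        have hgoodF : ∀ q ∈ F ++ ((d.getD (lastD p) []).foldl
            (fun (st : List (List Int) × PySem.Set Int) n =>
              if PySem.Set.contains st.2 n then st
              else (st.1 ++ [p ++ [n]], PySem.Set.add st.2 n)) (acc, vis)).1,
            GoodP ((d.getD (lastD p) []).foldl
              (fun (st : List Int × PySem.Dict Int (Option Int)) n =>
                if st.2.contains n then st else (st.1 ++ [n], st.2.insert n (some (lastD p))))
              (F.map lastD ++ acc.map lastD, parent)).2 q := by
          intro q hq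
          rcases List.mem_append.mp hq with hq1 | hq2
          · obtain ⟨hqne, hqch, hql⟩ := hgood q (List.mem_cons_of_mem _ (List.mem_append_left _ hq1))
            exact ⟨hqne, chainR_mono _ _ hdle _ hqch, le_trans hql hsize⟩
          · exact hgood' q hq2
        have := ih fA ((d.getD (lastD p) []).foldl
            (fun (st : List (List Int) × PySem.Set Int) n =>
              if PySem.Set.contains st.2 n then st
              else (st.1 ++ [p ++ [n]], PySem.Set.add st.2 n)) (acc, vis)).1
          ((d.getD (lastD p) []).foldl
            (fun (st : List Int × PySem.Dict Int (Option Int)) n =>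
              if st.2.contains n then st else (st.1 ++ [n], st.2.insert n (some (lastD p))))
            (F.map lastD ++ acc.map lastD, parent)).2
          ((d.getD (lastD p) []).foldl
            (fun (st : List (List Int) × PySem.Set Int) n =>
              if PySem.Set.contains st.2 n then st
              else (st.1 ++ [p ++ [n]], PySem.Set.add st.2 n)) (acc, vis)).2
          (by simp only [List.length_cons] at hfa; omega) hinv' hgoodF hnodK' hnodS' hsub'
        simp only [List.foldl_cons, hstepeq, List.length_cons, Nat.succ_sub_succ]
        cases hf : F.find? (fun p => PySem.List.pyGetD p (-1) 0 == g) with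
        | some q =>
          rw [hf] at this
          exact this
        | none =>
          rw [hf] at this
          exact this

-- A's node-at-a-time BFS equals B's level-at-a-time BFS, level by level
theorem bfs_levels (d : PySem.Dict Int (List Int)) (g root : Int) (flat : List Int)
    (hvals : ∀ k n, n ∈ d.getD k [] → n ∈ flat) :
    ∀ (fB : Nat) (F : List (List Int)) (fA : Nat)
      (parent : PySem.Dict Int (Option Int)) (vis : PySem.Set Int),
      (∀ n, parent.contains n = PySem.Set.contains vis n) →
      (∀ p ∈ F, GoodP parent p) →
      parent.keys.Nodup → vis.Nodup → (∀ x ∈ vis, x ∈ root :: flat) →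
      ((F.length : Int) + ((flat.length : Int) + 1 - (vis.length : Int)) ≤ (fA : Int)) →
      ((1 : Int) + ((flat.length : Int) + 1 - (vis.length : Int)) ≤ (fB : Int)) →
      bfsA d g fA (F.map lastD) parent = bfsB d g fB F vis := by
  intro fB
  induction fB with
  | zero =>
    intro F fA parent vis _ _ _ hnodS hsub _ hfb
    have hvN : vis.length ≤ flat.length + 1 :=
      nodup_subset_length vis (root :: flat) hnodS hsub
    omega
  | succ fB ih =>
    intro F fA parent vis hinv hgood hnodK hnodS hsub hfa hfb
    have hvN : vis.length ≤ flat.length + 1 :=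
      nodup_subset_length vis (root :: flat) hnodS hsub
    cases F with
    | nil =>
      simp only [List.map_nil, bfsB, List.isEmpty_nil, if_pos]
      cases fA <;> simp [bfsA]
    | cons p F =>
      have hFlen : (p :: F).length ≤ fA := by
        have := hfa; simp at this ⊢; omega
      have hlp := level_process d g root flat hvals (p :: F) fA [] parent vis hFlen hinv
        (by simpa using hgood) hnodK hnodS hsub
      simp only [bfsB, List.isEmpty_cons, Bool.false_eq_true, if_neg, not_false_iff]
      cases hf : (p :: F).find? (fun q => PySem.List.pyGetD q (-1) 0 == g) with
      | some q =>
        rw [hf] at hlp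
        simpa using hlp
      | none =>
        rw [hf] at hlp
        obtain ⟨parent', heq, hinv', hgood', hnodK', hnodS', hsub'⟩ := hlp
        have hsizes := levelB_sizes d (p :: F) ([], vis)
        set st := ((p :: F).foldl (fun (st : List (List Int) × PySem.Set Int) path =>
            (d.getD (PySem.List.pyGetD path (-1) 0) []).foldl
              (fun st n =>
                if PySem.Set.contains st.2 n then st
                else (st.1 ++ [path ++ [n]], PySem.Set.add st.2 n)) st) ([], vis)) with hst
        simp only [List.length_nil] at hsizes
        simp only [List.map_nil, List.append_nil] at heq
        rw [heq]
        show bfsA d g (fA - (p :: F).length) (List.map lastD st.1) parent' = bfsB d g fB st.1 st.2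
        by_cases hst1 : st.1 = []
        · rw [hst1]
          simp only [List.map_nil]
          cases (fA - (p :: F).length) <;> cases fB <;> simp [bfsA, bfsB]
        · have hq2 : 0 < st.1.length := by
            cases hx : st.1 with
            | nil => exact absurd hx hst1
            | cons a b => simp
          apply ih st.1 (fA - (p :: F).length) parent' st.2 hinv' hgood' hnodK' hnodS' hsub'
          · have hc : ((fA - (p :: F).length : Nat) : Int) = (fA : Int) - ((p :: F).length : Int) := by
              omega
            rw [hc]
            have h1 : List.length st.2 = List.length vis + st.1.length := by omega
            rw [h1]
            push_cast
            simp only [List.length_cons] at hfa ⊢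
            push_cast at hfa
            omega
          · have h1 : List.length st.2 = List.length vis + st.1.length := by omega
            rw [h1]
            push_cast
            push_cast at hfb
            omega

-- neighbour lists obtained from the dict all come from the adjacency's value lists
theorem getD_ofList_mem (l : List (Int × List Int)) (k n : Int)
    (h : n ∈ (PySem.Dict.ofList l).getD k []) : n ∈ l.flatMap (fun p => p.2) := by
  rw [PySem.Dict.getD_eq_get?_getD] at h
  cases hq : (PySem.Dict.ofList l).get? k with
  | none => rw [hq] at h; simp at h
  | some v =>
    rw [hq] at h
    simp only [Option.getD_some] at h
    have hitem : (k, v) ∈ (PySem.Dict.ofList l).items :=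
      PySem.Dict.mem_items_of_get?_eq_some _ hq
    have hv : v ∈ (PySem.Dict.ofList l).values := by
      simp only [PySem.Dict.values]
      exact List.mem_map_of_mem hitem
    have hsub : ∀ (L : List (Int × List Int)) w, w ∈ (PySem.Dict.ofList L).values → w ∈ L.map (·.2) := by
      intro L
      induction L using List.reverseRecOn with
      | nil =>
        intro w hw
        simp [PySem.Dict.ofList, PySem.Dict.update, PySem.Dict.empty, PySem.Dict.values] at hw
      | append_singleton L q ihL =>
        intro w hw
        have hof : PySem.Dict.ofList (L ++ [q]) = (PySem.Dict.ofList L).insert q.1 q.2 := by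
          simp [PySem.Dict.ofList, PySem.Dict.update, List.foldl_append]
        rw [hof] at hw
        rcases PySem.Dict.mem_values_insert _ _ _ _ hw with h1 | h2
        · simp [h1]
        · have := ihL w h2
          simp at this ⊢
          tauto
    have := hsub l v hv
    rw [List.mem_map] at this
    obtain ⟨pr, hpr, hv2⟩ := this
    exact List.mem_flatMap.mpr ⟨pr, hpr, hv2 ▸ h⟩

theorem sp_eq (adjacency : List (Int × List Int)) (s g : Int) :
    shortest_pathA adjacency s g = level_bfsB adjacency s g := by
  unfold shortest_pathA level_bfsB
  have hflip : (!((PySem.Dict.ofList adjacency).contains s)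
      || !((PySem.Dict.ofList adjacency).contains g))
      = !((PySem.Dict.ofList adjacency).contains s && (PySem.Dict.ofList adjacency).contains g) := by
    cases (PySem.Dict.ofList adjacency).contains s <;>
      cases (PySem.Dict.ofList adjacency).contains g <;> rfl
  by_cases hc : ((PySem.Dict.ofList adjacency).contains s
      && (PySem.Dict.ofList adjacency).contains g) = true
  · simp only [hflip, hc, Bool.not_true, Bool.false_eq_true, if_neg, if_pos, not_false_iff]
    have hvadd : PySem.Set.add PySem.Set.empty s = [s] := by
      rw [PySem.Set.add_of_not_mem (by simp [PySem.Set.empty])]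
      simp [PySem.Set.empty]
    have hsum : (adjacency.map (fun p => p.2.length)).sum
        = (adjacency.flatMap (fun p => p.2)).length := by
      rw [List.length_flatMap]
    have h1 : [s] = ([[s]]).map lastD := by simp [lastD]
    rw [h1]
    apply bfs_levels (PySem.Dict.ofList adjacency) g s (adjacency.flatMap (fun p => p.2))
      (fun k n hn => getD_ofList_mem adjacency k n hn)
    · intro k
      rw [PySem.Dict.contains_insert, set_contains_add]
      simp [PySem.Dict.contains_empty, PySem.Set.empty]
    · intro p hp
      have hp : p = [s] := by simpa using hp
      subst hp
      refine ⟨by simp, ?_, ?_⟩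
      · show ChainR _ [s].reverse
        simp only [List.reverse_singleton]
        exact PySem.Dict.get?_insert_self _ _ _
      · rw [items_insert_fresh_length _ _ _ (PySem.Dict.contains_empty s)]
        simp [PySem.Dict.empty]
    · exact PySem.Dict.nodup_keys_insert _ _ _ PySem.Dict.nodup_keys_empty
    · rw [hvadd]; simp
    · rw [hvadd]; intro x hx; simp at hx; simp [hx]
    · rw [hvadd]; simp only [List.length_cons, List.length_nil]
      rw [hsum]; push_cast; omega
    · rw [hvadd]; simp only [List.length_cons, List.length_nil]
      rw [hsum]; push_cast; omega
  · have hcf : ((PySem.Dict.ofList adjacency).contains s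
        && (PySem.Dict.ofList adjacency).contains g) = false := by
      cases hx : ((PySem.Dict.ofList adjacency).contains s
        && (PySem.Dict.ofList adjacency).contains g)
      · rfl
      · exact absurd hx hc
    simp [hflip, hcf]

theorem buildLoop_eq (adjacency : List (Int × List Int)) :
    ∀ (ts path : List Int) (cur : Int),
      buildLoopA adjacency ts path cur = buildLoopB adjacency ((cur :: ts).zip ts) path := by
  intro ts
  induction ts with
  | nil => intro path cur; rfl
  | cons t ts ih =>
    intro path cur
    show buildLoopA adjacency (t :: ts) path cur
      = buildLoopB adjacency ((cur, t) :: (t :: ts).zip ts) path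
    simp only [buildLoopA, buildLoopB, sp_eq]
    by_cases hseg : (level_bfsB adjacency cur t).isEmpty = true
    · simp only [hseg, if_pos]
    · simp only [hseg, if_neg, Bool.false_eq_true, not_false_iff]
      exact ih _ t

theorem build_eq (adjacency : List (Int × List Int)) (start_node : Int) (targets : List Int) :
    build_search_path adjacency start_node targets
      = build_search_path_alt adjacency start_node targets := by
  unfold build_search_path build_search_path_alt
  cases targets with
  | nil => rfl
  | cons t ts =>
    simp only [List.isEmpty_cons, if_neg, Bool.false_eq_true, not_false_iff]
    rw [buildLoop_eq adjacency (t :: ts) [start_node] start_node]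

-- ===== VERDICT (by name: the statement is the Claim_ definition above) =====
theorem build_search_path_spec : Claim_equal_build_search_path := by
  intro adjacency start_node targets _ _
  unfold Spec_build_search_path
  exact build_eq adjacency start_node targets
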